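-- pv_equiv track=rewrite | github.com/koeppl/squarechecker | squarechecker.py | psv_encoding
-- ===== SOURCE A (Python) =====
-- def psv_encoding(s: str) -> list[int]:
-- 	stack = []  # stores (char, index)
-- 	result = [0] * len(s)
-- 	for i, c in enumerate(s):
-- 		while stack and stack[-1][0] > c:
-- 			stack.pop()
-- 		if stack:
-- 			result[i] = i - stack[-1][1]
-- 		else:
-- 			result[i] = 0
-- 		stack.append((c, i))
-- 	return result
-- ===== SOURCE B (Python) =====
-- def psv_encoding(s: str) -> list[int]:
--     result = [0] * len(s)
--     for i in range(len(s)):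
--         for j in range(i - 1, -1, -1):
--             if s[j] <= s[i]:
--                 result[i] = i - j
--                 break
--     return result
-- ===== Notes on version B (the rewrite author's own statement) =====
-- stated objective: simpler
-- what changed: Replaces the monotonic stack with a per-index backward linear scan to the nearest previous position whose character is <= the current one.
import Mathlib
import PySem

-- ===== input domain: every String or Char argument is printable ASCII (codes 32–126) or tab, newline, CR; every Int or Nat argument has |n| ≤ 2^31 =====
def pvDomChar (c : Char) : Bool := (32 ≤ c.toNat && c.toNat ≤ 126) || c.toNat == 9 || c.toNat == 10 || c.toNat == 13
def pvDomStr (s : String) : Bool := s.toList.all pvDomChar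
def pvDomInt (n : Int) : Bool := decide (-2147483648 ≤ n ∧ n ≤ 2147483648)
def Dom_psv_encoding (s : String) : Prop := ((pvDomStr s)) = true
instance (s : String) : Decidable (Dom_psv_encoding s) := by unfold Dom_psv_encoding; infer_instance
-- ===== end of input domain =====

-- B replaces A's monotonic stack with a per-index backward scan (simpler); same return value.

-- ===== PORT A =====
-- while stack and stack[-1][0] > c: stack.pop()   (stack head = Python stack[-1])
def popGT (c : Char) : List (Char × Nat) → List (Char × Nat)
  | [] => []
  | (d, j) :: rest => if c < d then popGT c rest else (d, j) :: rest

-- one iteration of A's for-loop: state = (stack, result)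
def stepA (st : List (Char × Nat) × List Int) (p : Int × Char) :
    List (Char × Nat) × List Int :=
  let stack1 := popGT p.2 st.1
  let v : Int := match stack1 with
    | [] => 0
    | (_, j) :: _ => p.1 - (j : Int)
  ((p.2, p.1.toNat) :: stack1, st.2.set p.1.toNat v)

def psv_encoding (s : String) : List Int :=
  let l := s.toList
  ((PySem.List.enumerate l 0).foldl stepA ([], List.replicate l.length (0 : Int))).2

-- ===== PORT B =====
-- for j in range(i-1, -1, -1): if s[j] <= s[i]: result[i] = i - j; break   (j+1 = remaining candidates)
def bFind (l : List Char) (c : Char) (i : Nat) : Nat → Int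
  | 0 => 0
  | j + 1 => if l.getD j ' ' ≤ c then (i : Int) - (j : Int) else bFind l c i j

def psv_encoding_alt (s : String) : List Int :=
  let l := s.toList
  (List.range l.length).map (fun i => bFind l (l.getD i ' ') i i)

-- ===== PRECONDITION & SPEC =====
def Spec_psv_encoding (s : String) (out : List Int) : Prop := out = psv_encoding_alt s
instance (s : String) (out : List Int) : Decidable (Spec_psv_encoding s out) := by unfold Spec_psv_encoding; infer_instance

-- ===== CLAIM (what is proved, stated in full; the proofs are below) =====
def Claim_equal_psv_encoding : Prop := ∀ (s : String), Dom_psv_encoding s → Spec_psv_encoding s (psv_encoding s)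

-- ===== LEMMAS AND PROOFS =====

-- index of the nearest j < n with l[j] ≤ c (the value B's backward scan finds)
def prevLE (l : List Char) (c : Char) : Nat → Option Nat
  | 0 => none
  | j + 1 => if l.getD j ' ' ≤ c then some j else prevLE l c j

def topIdx (st : List (Char × Nat)) : Option Nat := st.head?.map (·.2)

theorem bFind_eq_prevLE (l : List Char) (c : Char) (i : Nat) : ∀ j,
    bFind l c i j = (match prevLE l c j with
      | some j' => (i : Int) - (j' : Int)
      | none => 0) := by
  intro j
  induction j with
  | zero => simp [bFind, prevLE]
  | succ j ih =>
    simp only [bFind, prevLE]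
    split_ifs with h
    · rfl
    · exact ih

theorem popGT_popGT (c c' : Char) (h : c' ≤ c) : ∀ st : List (Char × Nat),
    popGT c' (popGT c st) = popGT c' st := by
  intro st
  induction st with
  | nil => rfl
  | cons p rest ih =>
    obtain ⟨d, j⟩ := p
    by_cases hd : c < d
    · have hd' : c' < d := lt_of_le_of_lt h hd
      simp [popGT, hd, hd', ih]
    · by_cases hd' : c' < d
      · simp [popGT, hd, hd']
      · simp [popGT, hd, hd']

theorem mainA (l : List Char) : ∀ (rest : List Char) (i : Nat)
    (stack : List (Char × Nat)) (res : List Int),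
    l.drop i = rest → i ≤ l.length →
    (∀ c, topIdx (popGT c stack) = prevLE l c i) →
    res = (List.range i).map (fun k => bFind l (l.getD k ' ') k k)
            ++ List.replicate (l.length - i) 0 →
    ((PySem.List.enumerate rest (i : Int)).foldl stepA (stack, res)).2
      = (List.range l.length).map (fun k => bFind l (l.getD k ' ') k k) := by
  intro rest
  induction rest with
  | nil =>
    intro i stack res hdrop hle hinv hres
    have hlen : l.length ≤ i := by
      have := congrArg List.length hdrop
      simp at this; omega
    have hi : i = l.length := le_antisymm hle hlen
    subst hi
    simp [PySem.List.enumerate, hres]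
  | cons c rest' ih =>
    intro i stack res hdrop hle hinv hres
    have hi : i < l.length := by
      by_contra h
      rw [List.drop_eq_nil_of_le (by omega)] at hdrop
      exact (List.cons_ne_nil c rest') hdrop.symm
    have hget : l.getD i ' ' = c := by
      have : l.drop i = l.getD i ' ' :: l.drop (i + 1) := by
        rw [List.getD_eq_getElem l ' ' hi]
        exact (List.drop_eq_getElem_cons hi)
      rw [this] at hdrop
      exact (List.cons.injEq _ _ _ _ ▸ hdrop).1
    have hget' : l[i]?.getD ' ' = c := by
      rw [← hget]; simp [List.getD]
    have hdrop' : l.drop (i + 1) = rest' := by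
      have : l.drop i = l.getD i ' ' :: l.drop (i + 1) := by
        rw [List.getD_eq_getElem l ' ' hi]
        exact (List.drop_eq_getElem_cons hi)
      rw [this] at hdrop
      exact (List.cons.injEq _ _ _ _ ▸ hdrop).2
    rw [PySem.List.enumerate_cons, List.foldl_cons]
    have hcast : ((i : Int) + 1) = ((i + 1 : Nat) : Int) := by push_cast; ring
    rw [hcast]
    -- describe the new state
    have hstep : stepA (stack, res) ((i : Int), c)
        = ((c, i) :: popGT c stack,
           res.set i (bFind l c i i)) := by
      simp only [stepA, Int.toNat_natCast]
      congr 1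
      have hv := hinv c
      rw [bFind_eq_prevLE, ← hv]
      cases hpg : popGT c stack with
      | nil => simp [topIdx]
      | cons p tl => obtain ⟨d, j⟩ := p; simp [topIdx]
    rw [hstep]
    apply ih (i + 1) _ _ hdrop' (by omega)
    · -- invariant at i + 1
      intro c'
      by_cases hcc : c' < c
      · have h1 : popGT c' ((c, i) :: popGT c stack) = popGT c' (popGT c stack) := by
          simp [popGT, hcc]
        rw [h1, popGT_popGT c c' (le_of_lt hcc), hinv c']
        simp [prevLE, hget', not_le.mpr hcc]
      · have h1 : popGT c' ((c, i) :: popGT c stack) = (c, i) :: popGT c stack := by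
          simp [popGT, hcc]
        rw [h1]
        simp [topIdx, prevLE, hget', le_of_not_gt hcc]
    · -- result at i + 1
      rw [hres]
      have hlenmap : ((List.range i).map (fun k => bFind l (l.getD k ' ') k k)).length = i := by
        simp
      have hrep : l.length - i = (l.length - (i + 1)) + 1 := by omega
      rw [hrep, List.replicate_succ,
          List.set_append_right _ _ (by omega), hlenmap]
      simp only [Nat.sub_self, List.set_cons_zero]
      rw [List.range_succ, List.map_append, List.append_assoc]
      simp [List.getD, hget']

-- ===== VERDICT (by name: the statement is the Claim_ definition above) =====
theorem psv_encoding_spec : Claim_equal_psv_encoding := by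
  intro s _
  show psv_encoding s = psv_encoding_alt s
  unfold psv_encoding psv_encoding_alt
  apply mainA s.toList s.toList 0 [] _ (by simp) (by simp)
  · intro c; simp [popGT, topIdx, prevLE]
  · simp
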